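-- pv_equiv track=rewrite | github.com/deltasfer/delta2d | src/tile_utils.py | colli_ABP_mult
-- ===== SOURCE A (Python) =====
-- def colli_ABP_mult(boxes,pt):
--     ## retourne None si le point est dans aucune boite
--     ## retourne la premiere box des boites concernées sinon
--
--     goodx = []
--     goody = []
--
--     ## Premier niveau -> on vérifie si on est pas à gauche de toutes les box
--     for i in range(len(boxes)):
--         if pt[0] >= boxes[i][0]:
--             goodx.append(i)
--     if goodx == []:
--         return None # retourne un ouai bah t'es dans rien mon pote
--
--     ## 2e niveau -> on vérifie si on est pas en dessous des box qui sont bien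
--     for i in goodx:
--         if pt[1] >= boxes[i][1]:
--             goody.append(i)
--     if goody == []:
--         return None # retourne un ouai bah t'es dans rien mon pote
--
--     ## 3e niveau -> on vérifie si on est pas à droite des box qui sont bien
--     goodx = []
--     for i in goody:
--         if pt[0] < boxes[i][0] + boxes[i][2]:
--             goodx.append(i)
--     if goodx == []:
--         return None # retourne un ouai bah t'es dans rien mon pote
--
--     ## 4e niveau -> on vérifie si on est pas en haut des box qui sont bien
--     goody = []
--     for i in goodx:
--         if pt[1] < boxes[i][1] + boxes[i][3]:
--             goody.append(i)
--     if goody == []: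
--         return None # retourne un ouai bah t'es dans rien mon pote
--
--     return goody[0]
-- ===== SOURCE B (Python) =====
-- def colli_ABP_mult(boxes, pt):
--     ## single pass: return the index of the first box containing the point
--     px, py = pt[0], pt[1]
--     for i, b in enumerate(boxes):
--         if b[0] <= px < b[0] + b[2] and b[1] <= py < b[1] + b[3]:
--             return i
--     return None
-- ===== Notes on version B (the rewrite author's own statement) =====
-- stated objective: simpler
-- what changed: Replaced the four sequential list-building filter passes (with emptiness checks after each) by one loop over boxes in index order that tests all four containment conditions at once and returns the first matching index.
import Mathlib
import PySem

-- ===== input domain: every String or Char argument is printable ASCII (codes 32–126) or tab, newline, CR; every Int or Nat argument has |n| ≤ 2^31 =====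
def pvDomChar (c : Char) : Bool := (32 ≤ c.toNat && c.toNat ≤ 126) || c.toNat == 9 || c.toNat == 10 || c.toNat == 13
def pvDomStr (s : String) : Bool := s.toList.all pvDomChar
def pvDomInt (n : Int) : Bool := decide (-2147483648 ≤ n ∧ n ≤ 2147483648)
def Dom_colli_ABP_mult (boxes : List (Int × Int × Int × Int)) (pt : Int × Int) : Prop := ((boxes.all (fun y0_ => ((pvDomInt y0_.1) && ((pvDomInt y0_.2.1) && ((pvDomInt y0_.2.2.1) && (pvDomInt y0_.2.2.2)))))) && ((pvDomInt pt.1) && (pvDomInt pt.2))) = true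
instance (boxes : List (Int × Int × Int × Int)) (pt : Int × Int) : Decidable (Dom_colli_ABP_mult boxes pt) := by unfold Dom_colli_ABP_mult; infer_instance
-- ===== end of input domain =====

-- B replaces A's four sequential filter passes by a single first-match loop; objective: simpler.

-- ===== PORT A =====
-- four passes building index lists, each followed by an emptiness check, then goody[0]
def colli_ABP_mult (boxes : List (Int × Int × Int × Int)) (pt : Int × Int) : Option Int :=
  let goodx := (List.range boxes.length).foldl
    (fun acc i => if pt.1 ≥ (boxes.getD i (0,0,0,0)).1 then acc ++ [i] else acc) []
  if goodx = [] then none else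
  let goody := goodx.foldl
    (fun acc i => if pt.2 ≥ (boxes.getD i (0,0,0,0)).2.1 then acc ++ [i] else acc) []
  if goody = [] then none else
  let goodx2 := goody.foldl
    (fun acc i => if pt.1 < (boxes.getD i (0,0,0,0)).1 + (boxes.getD i (0,0,0,0)).2.2.1 then acc ++ [i] else acc) []
  if goodx2 = [] then none else
  let goody2 := goodx2.foldl
    (fun acc i => if pt.2 < (boxes.getD i (0,0,0,0)).2.1 + (boxes.getD i (0,0,0,0)).2.2.2 then acc ++ [i] else acc) []
  if goody2 = [] then none else
  goody2.head?.map Int.ofNat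

-- ===== PORT B =====
-- single pass: first index whose box contains the point
def colliAltGo (pt : Int × Int) : List (Int × Int × Int × Int) → Int → Option Int
  | [], _ => none
  | b :: rest, i =>
    if b.1 ≤ pt.1 ∧ pt.1 < b.1 + b.2.2.1 ∧ b.2.1 ≤ pt.2 ∧ pt.2 < b.2.1 + b.2.2.2
    then some i else colliAltGo pt rest (i + 1)

def colli_ABP_mult_alt (boxes : List (Int × Int × Int × Int)) (pt : Int × Int) : Option Int :=
  colliAltGo pt boxes 0

-- ===== PRECONDITION & SPEC =====
def Spec_colli_ABP_mult (boxes : List (Int × Int × Int × Int)) (pt : Int × Int) (out : Option Int) : Prop := out = colli_ABP_mult_alt boxes pt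
instance (boxes : List (Int × Int × Int × Int)) (pt : Int × Int) (out : Option Int) : Decidable (Spec_colli_ABP_mult boxes pt out) := by unfold Spec_colli_ABP_mult; infer_instance

-- ===== CLAIM (what is proved, stated in full; the proofs are below) =====
def Claim_equal_colli_ABP_mult : Prop := ∀ (boxes : List (Int × Int × Int × Int)) (pt : Int × Int), Dom_colli_ABP_mult boxes pt → Spec_colli_ABP_mult boxes pt (colli_ABP_mult boxes pt)

-- ===== LEMMAS AND PROOFS =====

-- the combined containment test
def colliHit (pt : Int × Int) (b : Int × Int × Int × Int) : Bool :=
  decide (b.1 ≤ pt.1 ∧ pt.1 < b.1 + b.2.2.1 ∧ b.2.1 ≤ pt.2 ∧ pt.2 < b.2.1 + b.2.2.2)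

theorem colliHit_and (pt : Int × Int) (b : Int × Int × Int × Int) :
    (decide (pt.2 < b.2.1 + b.2.2.2) &&
      (decide (pt.1 < b.1 + b.2.2.1) &&
        (decide (pt.2 ≥ b.2.1) && decide (pt.1 ≥ b.1)))) = colliHit pt b := by
  simp only [colliHit, ← Bool.decide_and, decide_eq_decide]
  constructor
  · rintro ⟨h4, h3, h2, h1⟩; exact ⟨h1, h3, h2, h4⟩
  · rintro ⟨h1, h3, h2, h4⟩; exact ⟨h4, h3, h2, h1⟩

-- A computes the head of one combined filter over the index range
theorem colli_A_eq_filter (boxes : List (Int × Int × Int × Int)) (pt : Int × Int) :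
    colli_ABP_mult boxes pt =
      ((List.range boxes.length).filter
        (fun i => colliHit pt (boxes.getD i (0,0,0,0)))).head?.map Int.ofNat := by
  unfold colli_ABP_mult
  simp only [PySem.List.foldl_append_ite_eq_filter, List.nil_append, List.filter_filter]
  have hd : ∀ i : ℕ, colliHit pt (boxes.getD i (0,0,0,0)) = true →
      (boxes.getD i (0,0,0,0)).1 ≤ pt.1 ∧ pt.1 < (boxes.getD i (0,0,0,0)).1 + (boxes.getD i (0,0,0,0)).2.2.1 ∧
      (boxes.getD i (0,0,0,0)).2.1 ≤ pt.2 ∧ pt.2 < (boxes.getD i (0,0,0,0)).2.1 + (boxes.getD i (0,0,0,0)).2.2.2 := by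
    intro i hi; simpa [colliHit] using hi
  split_ifs with h1 h2 h3 h4
  · have hF : (List.range boxes.length).filter
        (fun i => colliHit pt (boxes.getD i (0,0,0,0))) = [] := by
      rw [List.filter_eq_nil_iff]
      intro a ha hc
      have hmem : a ∈ (List.range boxes.length).filter
          (fun x => decide (pt.1 ≥ (boxes.getD x (0,0,0,0)).1)) :=
        List.mem_filter.mpr ⟨ha, decide_eq_true (hd a hc).1⟩
      rw [h1] at hmem; exact absurd hmem (List.not_mem_nil)
    rw [hF]; rfl
  · have hF : (List.range boxes.length).filter
        (fun i => colliHit pt (boxes.getD i (0,0,0,0))) = [] := by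
      rw [List.filter_eq_nil_iff]
      intro a ha hc
      have hmem : a ∈ (List.range boxes.length).filter
          (fun x => decide (pt.2 ≥ (boxes.getD x (0,0,0,0)).2.1) && decide (pt.1 ≥ (boxes.getD x (0,0,0,0)).1)) :=
        List.mem_filter.mpr ⟨ha, by
          rw [Bool.and_eq_true]
          exact ⟨decide_eq_true (hd a hc).2.2.1, decide_eq_true (hd a hc).1⟩⟩
      rw [h2] at hmem; exact absurd hmem (List.not_mem_nil)
    rw [hF]; rfl
  · have hF : (List.range boxes.length).filter
        (fun i => colliHit pt (boxes.getD i (0,0,0,0))) = [] := by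
      rw [List.filter_eq_nil_iff]
      intro a ha hc
      have hmem : a ∈ (List.range boxes.length).filter
          (fun x => decide (pt.1 < (boxes.getD x (0,0,0,0)).1 + (boxes.getD x (0,0,0,0)).2.2.1) &&
            (decide (pt.2 ≥ (boxes.getD x (0,0,0,0)).2.1) && decide (pt.1 ≥ (boxes.getD x (0,0,0,0)).1))) :=
        List.mem_filter.mpr ⟨ha, by
          simp only [Bool.and_eq_true]
          exact ⟨decide_eq_true (hd a hc).2.1, decide_eq_true (hd a hc).2.2.1, decide_eq_true (hd a hc).1⟩⟩
      rw [h3] at hmem; exact absurd hmem (List.not_mem_nil)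
    rw [hF]; rfl
  · have hF : (List.range boxes.length).filter
        (fun i => colliHit pt (boxes.getD i (0,0,0,0))) = [] := by
      rw [List.filter_eq_nil_iff]
      intro a ha hc
      have hmem : a ∈ (List.range boxes.length).filter
          (fun x => decide (pt.2 < (boxes.getD x (0,0,0,0)).2.1 + (boxes.getD x (0,0,0,0)).2.2.2) &&
            (decide (pt.1 < (boxes.getD x (0,0,0,0)).1 + (boxes.getD x (0,0,0,0)).2.2.1) &&
              (decide (pt.2 ≥ (boxes.getD x (0,0,0,0)).2.1) && decide (pt.1 ≥ (boxes.getD x (0,0,0,0)).1)))) :=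
        List.mem_filter.mpr ⟨ha, by
          simp only [Bool.and_eq_true]
          exact ⟨decide_eq_true (hd a hc).2.2.2, decide_eq_true (hd a hc).2.1,
            decide_eq_true (hd a hc).2.2.1, decide_eq_true (hd a hc).1⟩⟩
      rw [h4] at hmem; exact absurd hmem (List.not_mem_nil)
    rw [hF]; rfl
  · congr 2
    exact List.filter_congr (fun a _ => colliHit_and pt (boxes.getD a (0,0,0,0)))

-- B computes the same head, shifted by the running counter
theorem colli_B_eq_filter (pt : Int × Int) :
    ∀ (boxes : List (Int × Int × Int × Int)) (k : Int),
      colliAltGo pt boxes k =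
        ((List.range boxes.length).filter
          (fun i => colliHit pt (boxes.getD i (0,0,0,0)))).head?.map (fun i => (Int.ofNat i) + k)
  | [], k => by simp [colliAltGo]
  | b :: rest, k => by
    rw [colliAltGo]
    by_cases h : b.1 ≤ pt.1 ∧ pt.1 < b.1 + b.2.2.1 ∧ b.2.1 ≤ pt.2 ∧ pt.2 < b.2.1 + b.2.2.2
    · have hb : colliHit pt b = true := by simp only [colliHit, decide_eq_true_eq]; exact h
      rw [if_pos h]
      simp [List.length_cons, List.range_succ_eq_map, hb]
    · have hb : colliHit pt b = false := by
        push_neg at h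
        simp only [colliHit, decide_eq_false_iff_not]
        intro hcon
        exact absurd (h hcon.1 hcon.2.1 hcon.2.2.1) (not_le.mpr hcon.2.2.2)
      rw [if_neg h, colli_B_eq_filter pt rest (k + 1)]
      have hstep : (List.range (b :: rest).length).filter
          (fun i => colliHit pt ((b :: rest).getD i (0,0,0,0)))
          = ((List.range rest.length).filter
              (fun i => colliHit pt (rest.getD i (0,0,0,0)))).map Nat.succ := by
        simp [List.length_cons, List.range_succ_eq_map, hb, List.filter_map, Function.comp_def]
      rw [hstep, List.head?_map, Option.map_map]
      rcases ((List.range rest.length).filter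
          (fun i => colliHit pt (rest.getD i (0,0,0,0)))).head? with _ | i
      · rfl
      · simp only [Option.map_some, Function.comp]
        congr 1
        simp only [Nat.succ_eq_add_one, Int.ofNat_eq_natCast]
        push_cast
        ring

-- ===== VERDICT (by name: the statement is the Claim_ definition above) =====
theorem colli_ABP_mult_spec : Claim_equal_colli_ABP_mult := by
  intro boxes pt _
  unfold Spec_colli_ABP_mult colli_ABP_mult_alt
  rw [colli_A_eq_filter, colli_B_eq_filter]
  rcases ((List.range boxes.length).filter
      (fun i => colliHit pt (boxes.getD i (0,0,0,0)))).head? with _ | i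
  · rfl
  · simp only [Option.map_some, Int.add_zero]
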